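-- pv_equiv track=rewrite | github.com/balogdora/Automatic-Detection-of-Muscle-Fatigue | detekcija_zamora.py | zero_crossing
-- ===== SOURCE A (Python) =====
-- def zero_crossing(emg_lista):
--     crossings = []
--     crossings.append(0)
--     cnt_niz = 0
--     cnt = 0
--     for i in range(1, len(emg_lista)):
--         if emg_lista[i - 1] * emg_lista[i] < 0:
--             crossings[cnt_niz] += 1
--         cnt += 1
--         if cnt == 49:
--             cnt = 0
--             crossings.append(0)
--             cnt_niz += 1
--     return crossings
-- ===== SOURCE B (Python) =====
-- def zero_crossing(emg_lista):
--     # simpler decomposition: indicator list of sign changes, then fixed 49-wide window sums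
--     s = [1 if emg_lista[j] * emg_lista[j + 1] < 0 else 0
--          for j in range(len(emg_lista) - 1)]
--     return [sum(s[start:start + 49]) for start in range(0, len(s) + 1, 49)]
-- ===== Notes on version B (the rewrite author's own statement) =====
-- stated objective: simpler
-- what changed: Replaces A's stateful single loop (mutable crossings list, window index cnt_niz, counter cnt) with a two-stage decomposition: build the 0/1 sign-change indicator list once, then emit fixed 49-wide window sums over it via range(0, len(s)+1, 49).
import Mathlib
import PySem

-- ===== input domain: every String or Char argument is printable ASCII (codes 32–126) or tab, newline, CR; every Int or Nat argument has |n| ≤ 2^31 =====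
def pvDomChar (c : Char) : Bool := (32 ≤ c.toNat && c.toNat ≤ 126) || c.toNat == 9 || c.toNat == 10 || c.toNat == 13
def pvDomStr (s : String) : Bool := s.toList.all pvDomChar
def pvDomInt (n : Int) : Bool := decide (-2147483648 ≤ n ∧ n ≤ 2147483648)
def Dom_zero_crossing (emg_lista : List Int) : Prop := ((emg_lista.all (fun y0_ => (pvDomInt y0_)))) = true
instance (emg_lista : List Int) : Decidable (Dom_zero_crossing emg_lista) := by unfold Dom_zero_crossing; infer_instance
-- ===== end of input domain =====

-- B recomputes A's per-49-sample zero-crossing counts by the simpler decomposition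
-- "indicator list, then fixed-window sums" (objective: simpler); same return value everywhere.

-- ===== PORT A =====
-- state: (crossings, cnt_niz, cnt)
def zero_crossing (emg_lista : List Int) : List Int :=
  ((PySem.List.pyRange 1 (emg_lista.length : Int) 1).foldl
    (fun st i =>
      let crossings :=
        if PySem.List.pyGetD emg_lista (i - 1) 0 * PySem.List.pyGetD emg_lista i 0 < 0
        then st.1.modify st.2.1 (· + 1) else st.1
      let cnt := st.2.2 + 1
      if cnt = 49 then (crossings ++ [0], st.2.1 + 1, 0) else (crossings, st.2.1, cnt))
    ([0], 0, 0)).1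

-- ===== PORT B =====
def zero_crossing_alt (emg_lista : List Int) : List Int :=
  let s : List Int := (PySem.List.pyRange 0 ((emg_lista.length : Int) - 1) 1).map
    (fun j => if PySem.List.pyGetD emg_lista j 0 * PySem.List.pyGetD emg_lista (j + 1) 0 < 0 then 1 else 0)
  (PySem.List.pyRange 0 ((s.length : Int) + 1) 49).map
    (fun start => (PySem.List.slice s (some start) (some (start + 49))).sum)

-- ===== PRECONDITION & SPEC =====
def Spec_zero_crossing (emg_lista : List Int) (out : List Int) : Prop := out = zero_crossing_alt emg_lista
instance (emg_lista : List Int) (out : List Int) : Decidable (Spec_zero_crossing emg_lista out) := by unfold Spec_zero_crossing; infer_instance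

-- ===== CLAIM (what is proved, stated in full; the proofs are below) =====
def Claim_equal_zero_crossing : Prop := ∀ (emg_lista : List Int), Dom_zero_crossing emg_lista → Spec_zero_crossing emg_lista (zero_crossing emg_lista)

-- ===== LEMMAS AND PROOFS =====

-- A's loop body, named for the proofs (identical to the lambda in the port).
def stepA (emg_lista : List Int) : (List Int × Nat × Nat) → Int → (List Int × Nat × Nat) :=
  fun st i =>
    let crossings :=
      if PySem.List.pyGetD emg_lista (i - 1) 0 * PySem.List.pyGetD emg_lista i 0 < 0
      then st.1.modify st.2.1 (· + 1) else st.1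
    let cnt := st.2.2 + 1
    if cnt = 49 then (crossings ++ [0], st.2.1 + 1, 0) else (crossings, st.2.1, cnt)

-- A's loop on the indicator list: current window value v, pair-counter c.
def fA : List Int → Int → Nat → List Int
  | [], v, _ => [v]
  | x :: xs, v, c => if c + 1 = 49 then (v + x) :: fA xs 0 0 else fA xs (v + x) (c + 1)

-- chunk-of-49 sums with the trailing empty window
def gW (t : List Int) : List Int :=
  (t.take 49).sum :: (if _h : 49 ≤ t.length then gW (t.drop 49) else [])
termination_by t.length
decreasing_by simp; omega

lemma modify_append (done : List Int) (v : Int) (f : Int → Int) :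
    (done ++ [v]).modify done.length f = done ++ [f v] := by
  induction done with
  | nil => simp
  | cons d ds ih => simpa [List.modify_succ_cons] using ih

lemma loopA (js emg done : List Int) (v : Int) (c : Nat) (hc : c < 49) :
    (js.foldl (stepA emg) (done ++ [v], done.length, c)).1
      = done ++ fA (js.map (fun i =>
          if PySem.List.pyGetD emg (i - 1) 0 * PySem.List.pyGetD emg i 0 < 0 then 1 else 0)) v c := by
  induction js generalizing done v c with
  | nil => simp [fA]
  | cons i js ih =>
    set x : Int := if PySem.List.pyGetD emg (i - 1) 0 * PySem.List.pyGetD emg i 0 < 0 then 1 else 0 with hx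
    have hcr : (if PySem.List.pyGetD emg (i - 1) 0 * PySem.List.pyGetD emg i 0 < 0
        then (done ++ [v]).modify done.length (· + 1) else done ++ [v]) = done ++ [v + x] := by
      rw [hx]; split_ifs <;> simp [modify_append]
    simp only [List.foldl_cons, List.map_cons]
    by_cases h49 : c + 1 = 49
    · have : stepA emg (done ++ [v], done.length, c) i
          = ((done ++ [v + x]) ++ [0], (done ++ [v + x]).length, 0) := by
        simp [stepA, hcr, h49]
      rw [this, ih _ 0 0 (by omega)]
      simp only [fA, h49, if_pos, List.append_assoc, List.cons_append, List.nil_append]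
      rw [hx]
    · have : stepA emg (done ++ [v], done.length, c) i
          = (done ++ [v + x], done.length, c + 1) := by
        simp [stepA, hcr, h49]
      rw [this, ih _ (v + x) (c + 1) (by omega)]
      simp only [fA, h49, if_neg, not_false_iff]
      rw [hx]

lemma fA_closed (s : List Int) (v : Int) (c : Nat) (hc : c < 49) :
    fA s v c = (v + (s.take (49 - c)).sum)
      :: (if 49 - c ≤ s.length then gW (s.drop (49 - c)) else []) := by
  induction s generalizing v c with
  | nil =>
    simp only [fA, List.take_nil, List.sum_nil, add_zero, List.length_nil]
    have : ¬ (49 - c ≤ 0) := by omega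
    rw [if_neg this]
  | cons x xs ih =>
    by_cases h49 : c + 1 = 49
    · have hc48 : c = 48 := by omega
      subst hc48
      have h1 : (49 : Nat) - 48 = 1 := by norm_num
      rw [fA, if_pos h49, ih 0 0 (by norm_num), h1]
      have hg : gW xs = (xs.take 49).sum :: (if 49 ≤ xs.length then gW (xs.drop 49) else []) := by
        rw [gW]; simp [dite_eq_ite]
      simp only [List.take_succ_cons, List.take_zero, List.sum_cons, List.sum_nil, add_zero,
        List.drop_succ_cons, List.drop_zero, List.length_cons, zero_add,
        Nat.le_add_left, if_pos, hg]
    · have hsub : 49 - c = (48 - c) + 1 := by omega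
      rw [fA, if_neg h49, ih (v + x) (c + 1) (by omega), hsub]
      have h2 : 49 - (c + 1) = 48 - c := by omega
      rw [h2]
      simp only [List.take_succ_cons, List.sum_cons, List.drop_succ_cons, List.length_cons,
        Nat.add_le_add_iff_right]
      rw [add_assoc]

lemma fA_eq_gW (t : List Int) : fA t 0 0 = gW t := by
  rw [fA_closed t 0 0 (by norm_num)]
  conv_rhs => rw [gW]
  simp [dite_eq_ite]

lemma gW_eq_N (n : Nat) : ∀ (t : List Int), t.length = n →
    gW t = (List.range (t.length / 49 + 1)).map (fun k => ((t.drop (49 * k)).take 49).sum) := by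
  induction n using Nat.strong_induction_on with
  | _ n ih =>
    intro t ht
    rw [gW]
    by_cases h : 49 ≤ t.length
    · rw [dif_pos h]
      have hlen : (t.drop 49).length = t.length - 49 := by simp
      rw [ih (t.length - 49) (by omega) (t.drop 49) hlen]
      have hdiv : t.length / 49 + 1 = ((t.drop 49).length / 49 + 1) + 1 := by
        rw [hlen]; omega
      rw [hdiv]
      rw [show (List.range ((t.drop 49).length / 49 + 1 + 1)).map
            (fun k => ((t.drop (49 * k)).take 49).sum)
          = ((t.drop (49 * 0)).take 49).sum
            :: (List.range ((t.drop 49).length / 49 + 1)).map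
                (fun k => ((t.drop (49 * (k + 1))).take 49).sum) from by
        rw [List.range_succ_eq_map, List.map_cons, List.map_map]; rfl]
      simp only [Nat.mul_zero, List.drop_zero]
      congr 1
      apply List.map_congr_left
      intro k _
      rw [List.drop_drop, show 49 + 49 * k = 49 * (k + 1) from by ring]
    · rw [dif_neg h]
      have hdiv : t.length / 49 + 1 = 1 := by omega
      rw [hdiv]
      simp

lemma N_eq_alt (t : List Int) :
    (PySem.List.pyRange 0 ((t.length : Int) + 1) 49).map
        (fun start => (PySem.List.slice t (some start) (some (start + 49))).sum)
      = (List.range (t.length / 49 + 1)).map (fun k => ((t.drop (49 * k)).take 49).sum) := by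
  rw [PySem.List.pyRange_of_pos 0 ((t.length : Int) + 1) (by norm_num)]
  have hcount : (if (0:Int) < (t.length : Int) + 1
      then (((t.length : Int) + 1 - 0 + 49 - 1) / 49).toNat else 0) = t.length / 49 + 1 := by
    rw [if_pos (by positivity)]
    omega
  rw [hcount, List.map_map]
  apply List.map_congr_left
  intro k _
  simp only [Function.comp_apply]
  have h1 : (0 : Int) + 49 * (k : Int) = ((49 * k : Nat) : Int) := by push_cast; ring
  rw [h1]
  have h2 : ((49 * k : Nat) : Int) + 49 = ((49 * k : Nat) : Int) + ((49 : Nat) : Int) := by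
    norm_num
  rw [h2, PySem.List.slice_natCast_add]

lemma fold_eq_indicator (emg : List Int) :
    (PySem.List.pyRange 1 (emg.length : Int) 1).map (fun i =>
        if PySem.List.pyGetD emg (i - 1) 0 * PySem.List.pyGetD emg i 0 < 0 then (1:Int) else 0)
      = (PySem.List.pyRange 0 ((emg.length : Int) - 1) 1).map
        (fun j => if PySem.List.pyGetD emg j 0 * PySem.List.pyGetD emg (j + 1) 0 < 0 then 1 else 0) := by
  rw [PySem.List.pyRange_one 1 (emg.length : Int), PySem.List.pyRange_one 0 ((emg.length : Int) - 1)]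
  have hc : ((emg.length : Int) - 1).toNat = ((emg.length : Int) - 1 - 0).toNat := by norm_num
  rw [← hc, List.map_map, List.map_map]
  apply List.map_congr_left
  intro k _
  simp only [Function.comp_apply]
  have e1 : (1 : Int) + (k : Int) - 1 = 0 + (k : Int) := by ring
  have e2 : (1 : Int) + (k : Int) = 0 + (k : Int) + 1 := by ring
  rw [e1, e2]

-- ===== VERDICT (by name: the statement is the Claim_ definition above) =====
theorem zero_crossing_spec : Claim_equal_zero_crossing := by
  intro emg _
  unfold Spec_zero_crossing
  show zero_crossing emg = zero_crossing_alt emg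
  have hA : zero_crossing emg
      = ((PySem.List.pyRange 1 (emg.length : Int) 1).foldl (stepA emg)
          (([] : List Int) ++ [0], ([] : List Int).length, 0)).1 := rfl
  rw [hA, loopA _ emg [] 0 0 (by norm_num), List.nil_append]
  rw [fold_eq_indicator emg]
  set s : List Int := (PySem.List.pyRange 0 ((emg.length : Int) - 1) 1).map
    (fun j => if PySem.List.pyGetD emg j 0 * PySem.List.pyGetD emg (j + 1) 0 < 0 then 1 else 0) with hs
  rw [fA_eq_gW, gW_eq_N s.length s rfl]
  show _ = zero_crossing_alt emg
  unfold zero_crossing_alt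
  rw [← hs, N_eq_alt]
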